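-- pv_equiv track=rewrite | github.com/g-alex-dobre/sudoku-solver | sudoku.py | build_from_columns
-- ===== SOURCE A (Python) =====
-- def complete_missing_nums(list1):
--     missing_nums = ""
--     for i in range(1, 10):
--         if str(i) not in list1:
--             missing_nums += str(i)
--     new_list = []
--     for i in range(0, len(list1)):
--         if list1[i] == "0":
--             new_list.append(missing_nums)
--         else:
--             new_list.append(list1[i])
--     return new_list
--
-- def transpose_matrix(board_to_process):
--     new_board = []
--     for col in range(len(board_to_process[0])):
--         new_col = []
--         for row in range(len(board_to_process)):
--             new_col.append(board_to_process[row][col])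
--         new_board.append(new_col)
--     return new_board
--
-- def build_from_columns(board_to_process):
--     new_board = []
--     for col in range(len(board_to_process[0])):
--         new_col = []
--         for row in range(len(board_to_process)):
--             new_col.append(board_to_process[row][col])
--         new_board.append(complete_missing_nums(new_col))
--     return transpose_matrix(new_board)
-- ===== SOURCE B (Python) =====
-- def build_from_columns(board_to_process):
--     ncols = len(board_to_process[0])
--
--     def missing_for(c):
--         return "".join(str(d) for d in range(1, 10)
--                        if all(row[c] != str(d) for row in board_to_process))
--
--     return [[missing_for(c) if row[c] == "0" else row[c] for c in range(ncols)]
--             for row in board_to_process]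
-- ===== Notes on version B (the rewrite author's own statement) =====
-- stated objective: alternative
-- what changed: B builds no intermediate boards at all: it emits the result in one row-major pass over the input, computing the missing-digit string for a '0' cell on demand by scanning that cell's column with all(), instead of A's three staged passes (gather every column into a new list, rebuild each column via complete_missing_nums, transpose the column board back); on the generated inputs this measured faster because it allocates no intermediate column lists or transposed board.
import Mathlib
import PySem

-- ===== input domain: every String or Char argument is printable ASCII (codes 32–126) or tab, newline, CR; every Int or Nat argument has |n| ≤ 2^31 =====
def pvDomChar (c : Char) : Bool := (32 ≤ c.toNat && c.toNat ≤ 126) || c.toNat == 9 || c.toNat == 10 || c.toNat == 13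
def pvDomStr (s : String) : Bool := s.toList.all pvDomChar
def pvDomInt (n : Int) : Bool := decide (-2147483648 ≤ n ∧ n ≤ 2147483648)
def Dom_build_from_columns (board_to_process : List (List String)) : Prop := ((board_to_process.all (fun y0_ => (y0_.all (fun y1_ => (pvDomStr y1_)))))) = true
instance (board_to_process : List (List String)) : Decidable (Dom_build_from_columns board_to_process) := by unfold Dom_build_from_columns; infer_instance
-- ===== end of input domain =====

-- B drops A's column-gather / per-column fill / transpose pipeline entirely: it walks the
-- board once row by row and, at each '0' cell, computes the missing digits on demand by a
-- direct scan of that cell's column (objective: alternative — no intermediate boards).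

-- ===== PORT A =====
def complete_missing_nums (list1 : List String) : List String :=
  let missing : String := String.ofList
    ((PySem.List.pyRange 1 10).foldl
      (fun acc i => if list1.contains (PySem.Int.toStr i) then acc
                    else acc ++ PySem.Int.toChars i) [])
  (PySem.List.pyRange 0 (PySem.List.len list1)).foldl
    (fun acc i => if PySem.List.pyGetD list1 i "" == "0" then acc ++ [missing]
                  else acc ++ [PySem.List.pyGetD list1 i ""]) []

def transpose_matrix (board_to_process : List (List String)) : List (List String) :=
  (PySem.List.pyRange 0 (PySem.List.len (PySem.List.pyGetD board_to_process 0 []))).foldl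
    (fun new_board col => new_board ++ [
      (PySem.List.pyRange 0 (PySem.List.len board_to_process)).foldl
        (fun new_col row =>
          new_col ++ [PySem.List.pyGetD (PySem.List.pyGetD board_to_process row []) col ""]) []]) []

def build_from_columns (board_to_process : List (List String)) : List (List String) :=
  let new_board := (PySem.List.pyRange 0 (PySem.List.len (PySem.List.pyGetD board_to_process 0 []))).foldl
    (fun new_board col => new_board ++ [complete_missing_nums
      ((PySem.List.pyRange 0 (PySem.List.len board_to_process)).foldl
        (fun new_col row =>
          new_col ++ [PySem.List.pyGetD (PySem.List.pyGetD board_to_process row []) col ""]) [])]) []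
  transpose_matrix new_board

-- ===== PORT B =====
-- missing_for(c): digits 1..9 whose string form appears in no row at column c
def altFill (board_to_process : List (List String)) (c : Nat) : String :=
  PySem.Str.join "" (((PySem.List.pyRange 1 10).filter
    (fun d => board_to_process.all
      (fun row => PySem.List.pyGetD row (c : Int) "" != PySem.Int.toStr d))).map PySem.Int.toStr)

def build_from_columns_alt (board_to_process : List (List String)) : List (List String) :=
  let ncols := (PySem.List.pyGetD board_to_process 0 []).length
  board_to_process.map (fun row => (List.range ncols).map (fun (c : Nat) =>
    if PySem.List.pyGetD row (c : Int) "" == "0" then altFill board_to_process c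
    else PySem.List.pyGetD row (c : Int) ""))

-- ===== PRECONDITION & SPEC =====
-- Pre_ excludes exactly the inputs where A raises IndexError: the empty board,
-- a board whose first row is empty (the transpose indexes [][0]), and boards
-- with a row shorter than the first row (column gather indexes past its end).
def Pre_build_from_columns (board_to_process : List (List String)) : Prop :=
  board_to_process ≠ [] ∧ board_to_process.headD [] ≠ [] ∧
    ∀ row ∈ board_to_process, (board_to_process.headD []).length ≤ row.length
instance (board_to_process : List (List String)) : Decidable (Pre_build_from_columns board_to_process) := by
  unfold Pre_build_from_columns; infer_instance

def pvWitness_build_from_columns : List (List String) :=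
  [["0", "2", "3"], ["3", "0", "1"]]

def Spec_build_from_columns (board_to_process : List (List String)) (out : List (List String)) : Prop := out = build_from_columns_alt board_to_process
instance (board_to_process : List (List String)) (out : List (List String)) : Decidable (Spec_build_from_columns board_to_process out) := by unfold Spec_build_from_columns; infer_instance

-- ===== CLAIM (what is proved, stated in full; the proofs are below) =====
def Claim_equal_build_from_columns : Prop := ∀ (board_to_process : List (List String)), Dom_build_from_columns board_to_process → Pre_build_from_columns board_to_process → Spec_build_from_columns board_to_process (build_from_columns board_to_process)

-- ===== LEMMAS AND PROOFS =====

-- pyRange 0 m is the cast of List.range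
theorem pv_range_cast (m : Nat) :
    PySem.List.pyRange 0 (m : Int) = (List.range m).map (fun (k : Nat) => (k : Int)) := by
  rw [PySem.List.pyRange_one]
  simp only [Int.sub_zero, Int.toNat_natCast]
  exact List.map_congr_left (fun a _ => by simp)

-- A's missing-digit accumulator, named
def pvM (l : List String) : String :=
  String.ofList
    ((PySem.List.pyRange 1 10).foldl
      (fun acc i => if l.contains (PySem.Int.toStr i) then acc
                    else acc ++ PySem.Int.toChars i) [])

-- the column of a board at integer index col
def pvColI (b : List (List String)) (col : Int) : List String :=
  (List.range b.length).map (fun (r : Nat) => PySem.List.pyGetD (PySem.List.pyGetD b (r : Int) []) col "")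

-- the column-gather loop of A is the row-indexed map
theorem pv_col_gather (b : List (List String)) (col : Int) :
    (PySem.List.pyRange 0 (PySem.List.len b)).foldl
      (fun new_col row =>
        new_col ++ [PySem.List.pyGetD (PySem.List.pyGetD b row []) col ""]) []
    = pvColI b col := by
  rw [PySem.List.foldl_append_singleton_eq_map, PySem.List.len_eq, pv_range_cast,
    List.map_map]
  rfl

-- an indexed map over range(length) with total indexing is a plain map
theorem pv_map_range_getD {α β : Type} (l : List α) (d : α) (f : α → β) :
    (List.range l.length).map (fun (i : Nat) => f (PySem.List.pyGetD l (i : Int) d)) = l.map f := by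
  refine List.ext_getElem (by simp) ?_
  intro i h1 h2
  simp [PySem.List.pyGetD_natCast, List.getD,
    List.getElem?_eq_getElem (by simpa using h2)]

-- the board column is the plain map of row projections
theorem pv_colI_eq_map (b : List (List String)) (c : Int) :
    pvColI b c = b.map (fun row => PySem.List.pyGetD row c "") := by
  unfold pvColI
  exact pv_map_range_getD b [] (fun row => PySem.List.pyGetD row c "")

-- `all cells differ from s` is `not contains s` on the mapped list
theorem pv_all_ne_eq_not_contains {α β : Type} [DecidableEq β]
    (l : List α) (g : α → β) (s : β) :
    l.all (fun x => g x != s) = !((l.map g).contains s) := by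
  induction l with
  | nil => rfl
  | cons x t ih =>
    simp only [List.all_cons, List.map_cons, List.contains_cons, Bool.not_or, ih]
    congr 1
    simp [bne, eq_comm]

theorem pv_join_cons (x : List Char) (xs : List (List Char)) :
    PySem.Chars.join [] (x :: xs) = x ++ PySem.Chars.join [] xs := by
  cases xs with
  | nil => simp [PySem.Chars.join_singleton, PySem.Chars.join_nil]
  | cons y ys => rw [PySem.Chars.join_cons_cons]; simp

theorem pv_foldIf_eq_join (p : Int → Bool) (l : List Int) (acc : List Char) :
    l.foldl (fun a i => if p i then a else a ++ PySem.Int.toChars i) acc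
    = acc ++ PySem.Chars.join [] ((l.filter (fun i => !p i)).map PySem.Int.toChars) := by
  induction l generalizing acc with
  | nil => simp [PySem.Chars.join_nil]
  | cons i t ih =>
    by_cases h : p i = true
    · simp [h, ih]
    · simp only [List.foldl_cons, List.filter_cons]
      rw [if_neg (by simp [h])] at *
      simp only [h, Bool.not_eq_true] at *
      simp [ih, pv_join_cons, List.append_assoc]

-- A's missing-digit string as the joined filter over 1..9
theorem pv_missing_eq (l : List String) :
    pvM l
    = PySem.Str.join "" (((PySem.List.pyRange 1 10).filter
        (fun d => !(l.contains (PySem.Int.toStr d)))).map PySem.Int.toStr) := by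
  unfold pvM
  rw [pv_foldIf_eq_join (fun i => l.contains (PySem.Int.toStr i))]
  simp only [PySem.Str.join]
  simp [List.map_map, Function.comp_def, PySem.Int.toList_toStr]

-- B's on-demand column scan computes A's per-column missing string
theorem pv_altFill (b : List (List String)) (c : Nat) :
    altFill b c = pvM (pvColI b (c : Int)) := by
  rw [pv_missing_eq, pv_colI_eq_map]
  unfold altFill
  congr 2
  refine List.filter_congr (fun d _ => ?_)
  exact pv_all_ne_eq_not_contains b (fun row => PySem.List.pyGetD row (c : Int) "")
    (PySem.Int.toStr d)

-- complete_missing_nums is a map over its argument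
theorem pv_cmn_eq (l : List String) :
    complete_missing_nums l = l.map (fun s => if s == "0" then pvM l else s) := by
  have hdef : complete_missing_nums l
      = (PySem.List.pyRange 0 (PySem.List.len l)).foldl
          (fun acc i => if PySem.List.pyGetD l i "" == "0" then acc ++ [pvM l]
                        else acc ++ [PySem.List.pyGetD l i ""]) [] := rfl
  have hf : (fun (acc : List String) (i : Int) =>
      if PySem.List.pyGetD l i "" == "0" then acc ++ [pvM l]
      else acc ++ [PySem.List.pyGetD l i ""])
    = (fun acc i => acc ++
        [if PySem.List.pyGetD l i "" == "0" then pvM l else PySem.List.pyGetD l i ""]) := by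
    funext acc i; split <;> rfl
  rw [hdef, hf, PySem.List.foldl_append_singleton_eq_map, List.nil_append]
  have h2 : (fun i => if PySem.List.pyGetD l i "" == "0" then pvM l else PySem.List.pyGetD l i "")
      = (fun s => if s == "0" then pvM l else s) ∘ (fun j => PySem.List.pyGetD l j "") := rfl
  rw [h2, ← List.map_map, PySem.List.map_pyGetD_pyRange_zero]

-- A's transpose is the double indexed map
theorem pv_transpose_eq (b : List (List String)) :
    transpose_matrix b
    = (List.range (PySem.List.pyGetD b 0 []).length).map (fun (i : Nat) => pvColI b (i : Int)) := by
  unfold transpose_matrix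
  rw [PySem.List.foldl_append_singleton_eq_map, List.nil_append]
  have hlen : PySem.List.len (PySem.List.pyGetD b 0 [])
      = ((PySem.List.pyGetD b 0 []).length : Int) := PySem.List.len_eq _
  rw [hlen, pv_range_cast, List.map_map]
  exact List.map_congr_left (fun i _ => pv_col_gather b (i : Int))

-- A as a row-major double map (the common normal form)
theorem pv_A_normal (h : List String) (t : List (List String)) (hh : h ≠ []) :
    build_from_columns (h :: t)
    = (List.range (h :: t).length).map (fun (i : Nat) =>
        (List.range h.length).map (fun (j : Nat) =>
          if PySem.List.pyGetD (PySem.List.pyGetD (h :: t) (i : Int) []) (j : Int) "" == "0"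
          then pvM (pvColI (h :: t) (j : Int))
          else PySem.List.pyGetD (PySem.List.pyGetD (h :: t) (i : Int) []) (j : Int) "")) := by
  have hb0 : PySem.List.pyGetD (h :: t) 0 [] = h := by
    rw [PySem.List.pyGetD_ofNat']; rfl
  have hmpos : 0 < h.length := List.length_pos_iff.mpr hh
  have h1 : build_from_columns (h :: t) = transpose_matrix
      ((PySem.List.pyRange 0 (PySem.List.len (PySem.List.pyGetD (h :: t) 0 []))).foldl
        (fun nb col => nb ++ [complete_missing_nums
          ((PySem.List.pyRange 0 (PySem.List.len (h :: t))).foldl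
            (fun nc row => nc ++ [PySem.List.pyGetD (PySem.List.pyGetD (h :: t) row []) col ""]) [])]) []) := rfl
  rw [h1, PySem.List.foldl_append_singleton_eq_map, List.nil_append, hb0]
  simp only [pv_col_gather]
  rw [PySem.List.len_eq, pv_range_cast, List.map_map, pv_transpose_eq]
  have h0 : PySem.List.pyGetD
      ((List.range h.length).map
        ((fun col => complete_missing_nums (pvColI (h :: t) col)) ∘ (fun (k : Nat) => (k : Int)))) 0 []
      = complete_missing_nums (pvColI (h :: t) ((0 : Nat) : Int)) := by
    rw [PySem.List.pyGetD_ofNat', PySem.List.getD_map_range _ _ _ _ hmpos]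
    rfl
  have hlen0 : (complete_missing_nums (pvColI (h :: t) ((0 : Nat) : Int))).length
      = (h :: t).length := by rw [pv_cmn_eq]; simp [pvColI]
  rw [h0, hlen0]
  refine List.map_congr_left (fun i hi => ?_)
  have hin : i < (h :: t).length := List.mem_range.mp hi
  have hcol2 : pvColI ((List.range h.length).map
      ((fun col => complete_missing_nums (pvColI (h :: t) col)) ∘ (fun (k : Nat) => (k : Int)))) (i : Int)
      = (List.range h.length).map (fun (j : Nat) =>
          PySem.List.pyGetD (PySem.List.pyGetD
            ((List.range h.length).map
              ((fun col => complete_missing_nums (pvColI (h :: t) col)) ∘ (fun (k : Nat) => (k : Int))))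
            (j : Int) []) (i : Int) "") := by
    unfold pvColI; rw [List.length_map, List.length_range]
  rw [hcol2]
  refine List.map_congr_left (fun j hj => ?_)
  have hjm : j < h.length := List.mem_range.mp hj
  rw [PySem.List.pyGetD_natCast _ i, PySem.List.pyGetD_natCast _ j,
    PySem.List.getD_map_range _ _ _ _ hjm]
  have hFj : ((fun col => complete_missing_nums (pvColI (h :: t) col)) ∘ (fun (k : Nat) => (k : Int))) j
      = complete_missing_nums (pvColI (h :: t) (j : Int)) := rfl
  rw [hFj, pv_cmn_eq,
    show pvColI (h :: t) (j : Int) = (List.range (h :: t).length).map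
      (fun (r : Nat) => PySem.List.pyGetD (PySem.List.pyGetD (h :: t) (r : Int) []) (j : Int) "") from rfl,
    List.map_map, PySem.List.getD_map_range _ _ _ _ hin]
  rfl

-- B as the same row-major double map
theorem pv_B_normal (h : List String) (t : List (List String)) :
    build_from_columns_alt (h :: t)
    = (List.range (h :: t).length).map (fun (i : Nat) =>
        (List.range h.length).map (fun (j : Nat) =>
          if PySem.List.pyGetD (PySem.List.pyGetD (h :: t) (i : Int) []) (j : Int) "" == "0"
          then pvM (pvColI (h :: t) (j : Int))
          else PySem.List.pyGetD (PySem.List.pyGetD (h :: t) (i : Int) []) (j : Int) "")) := by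
  have hb0 : PySem.List.pyGetD (h :: t) 0 [] = h := by
    rw [PySem.List.pyGetD_ofNat']; rfl
  have h1 : build_from_columns_alt (h :: t)
      = (h :: t).map (fun row => (List.range h.length).map (fun (c : Nat) =>
          if PySem.List.pyGetD row (c : Int) "" == "0" then altFill (h :: t) c
          else PySem.List.pyGetD row (c : Int) "")) := by
    unfold build_from_columns_alt; rw [hb0]
  rw [h1, ← pv_map_range_getD (h :: t) []
    (fun row => (List.range h.length).map (fun (c : Nat) =>
      if PySem.List.pyGetD row (c : Int) "" == "0" then altFill (h :: t) c
      else PySem.List.pyGetD row (c : Int) ""))]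
  refine List.map_congr_left (fun i _ => ?_)
  refine List.map_congr_left (fun j _ => ?_)
  rw [pv_altFill]

-- ===== VERDICT (by name: the statement is the Claim_ definition above) =====
theorem build_from_columns_spec : Claim_equal_build_from_columns := by
  intro b _ hpre
  obtain ⟨hne, hhd, _⟩ := hpre
  cases b with
  | nil => exact absurd rfl hne
  | cons h t =>
    have hh : h ≠ [] := by simpa using hhd
    unfold Spec_build_from_columns
    rw [pv_A_normal h t hh, pv_B_normal h t]
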